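-- pv_equiv track=rewrite | github.com/GitHubByJelle/Map-Poster | src/make_map_poster.py | classify_road
-- ===== SOURCE A (Python) =====
-- from typing import Optional, Tuple, Dict, Any
--
-- def classify_road(highway_val: Optional[str]) -> str:
--     if not highway_val:
--         return "other"
--     val = highway_val if isinstance(highway_val, str) else highway_val[0]
--     if val in {"motorway", "motorway_link"}: return "motorway"
--     if val in {"trunk", "trunk_link"}: return "trunk"
--     if val in {"primary", "primary_link"}: return "primary"
--     if val in {"secondary", "secondary_link"}: return "secondary"
--     if val in {"tertiary", "tertiary_link"}: return "tertiary"
--     if val in {"residential", "living_street"}: return "residential"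
--     if val in {"service", "unclassified"}: return "service"
--     if any(key in val for key in ("foot", "path", "cycle", "pedestrian")): return "footway"
--     return "other"
-- ===== SOURCE B (Python) =====
-- _ALIASES = (("residential", "residential"), ("living_street", "residential"),
--             ("service", "service"), ("unclassified", "service"))
--
-- def classify_road(highway_val):
--     if not highway_val:
--         return "other"
--     val = highway_val if isinstance(highway_val, str) else highway_val[0]
--     # Normalize away the "_link" suffix: a link road classifies as its base road.
--     base = val[:-5] if val.endswith("_link") else val
--     if base in ("motorway", "trunk", "primary", "secondary", "tertiary"):
--         return base
--     for name, cat in _ALIASES: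
--         if val == name:
--             return cat
--     return "footway" if any(k in val for k in ("foot", "path", "cycle", "pedestrian")) else "other"
-- ===== Notes on version B (the rewrite author's own statement) =====
-- stated objective: simpler
-- what changed: B classifies by normalization instead of enumeration: it strips a '_link' suffix once and matches the base against the five link-bearing categories, then scans a small alias table for the two irregular pairs, keeping only the substring fallback; A enumerates all fourteen spellings in seven set-membership branches.
import Mathlib
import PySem

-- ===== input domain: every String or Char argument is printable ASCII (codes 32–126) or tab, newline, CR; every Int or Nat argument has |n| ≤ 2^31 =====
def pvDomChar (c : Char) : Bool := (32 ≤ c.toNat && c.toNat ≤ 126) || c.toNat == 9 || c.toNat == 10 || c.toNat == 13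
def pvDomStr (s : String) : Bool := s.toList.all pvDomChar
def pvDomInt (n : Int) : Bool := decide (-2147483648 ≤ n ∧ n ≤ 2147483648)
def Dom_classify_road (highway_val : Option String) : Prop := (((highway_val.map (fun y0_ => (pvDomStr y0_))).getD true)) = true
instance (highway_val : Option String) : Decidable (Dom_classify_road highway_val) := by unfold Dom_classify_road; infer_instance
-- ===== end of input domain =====

-- B normalizes a '_link' suffix away and matches the base category, instead of A's
-- seven-branch enumeration of both spellings (objective: simpler).

-- ===== PORT A =====
def classify_road (highway_val : Option String) : String :=
  match highway_val with
  | none => "other"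
  | some v =>
    if v = "" then "other"
    else if v = "motorway" ∨ v = "motorway_link" then "motorway"
    else if v = "trunk" ∨ v = "trunk_link" then "trunk"
    else if v = "primary" ∨ v = "primary_link" then "primary"
    else if v = "secondary" ∨ v = "secondary_link" then "secondary"
    else if v = "tertiary" ∨ v = "tertiary_link" then "tertiary"
    else if v = "residential" ∨ v = "living_street" then "residential"
    else if v = "service" ∨ v = "unclassified" then "service"
    else if (["foot", "path", "cycle", "pedestrian"].any (fun k => PySem.Str.isIn k v)) then "footway"
    else "other"

-- ===== PORT B =====
-- B's module-level alias table (_ALIASES), scanned in order (the Python for-loop = find?)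
def aliasTable : List (String × String) :=
  [("residential", "residential"), ("living_street", "residential"),
   ("service", "service"), ("unclassified", "service")]

def classify_road_alt (highway_val : Option String) : String :=
  match highway_val with
  | none => "other"
  | some v =>
    if v = "" then "other"
    else
      let base := if PySem.Str.endswith v "_link" then PySem.Str.slice v none (some (-5)) else v
      if base ∈ ["motorway", "trunk", "primary", "secondary", "tertiary"] then base
      else
        match aliasTable.find? (fun p => p.1 == v) with
        | some p => p.2
        | none =>
          if (["foot", "path", "cycle", "pedestrian"].any (fun k => PySem.Str.isIn k v)) then "footway"
          else "other"

-- ===== PRECONDITION & SPEC =====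
def Spec_classify_road (highway_val : Option String) (out : String) : Prop := out = classify_road_alt highway_val
instance (highway_val : Option String) (out : String) : Decidable (Spec_classify_road highway_val out) := by unfold Spec_classify_road; infer_instance

-- ===== CLAIM (what is proved, stated in full; the proofs are below) =====
def Claim_equal_classify_road : Prop := ∀ (highway_val : Option String), Dom_classify_road highway_val → Spec_classify_road highway_val (classify_road highway_val)

-- ===== LEMMAS AND PROOFS =====

-- stripping the '_link' suffix is inverse to appending it: if v ends with "_link"
-- and v[:-5] = b then v = b ++ "_link"
theorem strip_link_eq (v b : String) (h : PySem.Str.endswith v "_link" = true)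
    (hb : PySem.Str.slice v none (some (-5)) = b) : v = b ++ "_link" := by
  rw [PySem.Str.endswith_eq, PySem.Chars.endswith_iff] at h
  obtain ⟨t, ht⟩ := h
  have hbl : b.toList = t := by
    rw [← hb, PySem.Str.toList_slice, PySem.Chars.slice_eq_listSlice,
        PySem.List.slice_to_neg_ofNat v.toList 5 (by omega), ← ht]
    simp
  rw [← String.toList_inj, ← ht, ← hbl]
  simp [hbl]

-- ===== VERDICT (by name: the statement is the Claim_ definition above) =====
theorem classify_road_spec : Claim_equal_classify_road := by
  intro highway_val _
  cases highway_val with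
  | none => rfl
  | some v =>
    simp only [Spec_classify_road, classify_road, classify_road_alt]
    by_cases h1 : v = "motorway"
    · subst h1; decide
    by_cases h2 : v = "motorway_link"
    · subst h2; decide
    by_cases h3 : v = "trunk"
    · subst h3; decide
    by_cases h4 : v = "trunk_link"
    · subst h4; decide
    by_cases h5 : v = "primary"
    · subst h5; decide
    by_cases h6 : v = "primary_link"
    · subst h6; decide
    by_cases h7 : v = "secondary"
    · subst h7; decide
    by_cases h8 : v = "secondary_link"
    · subst h8; decide
    by_cases h9 : v = "tertiary"
    · subst h9; decide
    by_cases h10 : v = "tertiary_link"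
    · subst h10; decide
    -- v is none of the ten link-category spellings: B's base test fails
    have hbase : ¬ ((if PySem.Str.endswith v "_link" then PySem.Str.slice v none (some (-5)) else v)
        ∈ ["motorway", "trunk", "primary", "secondary", "tertiary"]) := by
      split
      · next hend =>
        intro hmem
        simp only [List.mem_cons, List.not_mem_nil, or_false] at hmem
        rcases hmem with hm | hm | hm | hm | hm
        · exact h2 (strip_link_eq v _ hend hm)
        · exact h4 (strip_link_eq v _ hend hm)
        · exact h6 (strip_link_eq v _ hend hm)
        · exact h8 (strip_link_eq v _ hend hm)
        · exact h10 (strip_link_eq v _ hend hm)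
      · intro hmem
        simp only [List.mem_cons, List.not_mem_nil, or_false] at hmem
        rcases hmem with hm | hm | hm | hm | hm
        · exact h1 hm
        · exact h3 hm
        · exact h5 hm
        · exact h7 hm
        · exact h9 hm
    by_cases h11 : v = "residential"
    · subst h11; decide
    by_cases h12 : v = "living_street"
    · subst h12; decide
    by_cases h13 : v = "service"
    · subst h13; decide
    by_cases h14 : v = "unclassified"
    · subst h14; decide
    by_cases h0 : v = ""
    · subst h0; decide
    have hfind : (aliasTable.find? (fun p => p.1 == v)) = none := by
      rw [List.find?_eq_none]
      intro x hx
      fin_cases hx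
      · simp only [beq_iff_eq]; exact fun h => h11 h.symm
      · simp only [beq_iff_eq]; exact fun h => h12 h.symm
      · simp only [beq_iff_eq]; exact fun h => h13 h.symm
      · simp only [beq_iff_eq]; exact fun h => h14 h.symm
    rw [if_neg h0, if_neg h0, if_neg hbase, hfind,
        if_neg (not_or.mpr ⟨h1, h2⟩), if_neg (not_or.mpr ⟨h3, h4⟩),
        if_neg (not_or.mpr ⟨h5, h6⟩), if_neg (not_or.mpr ⟨h7, h8⟩),
        if_neg (not_or.mpr ⟨h9, h10⟩), if_neg (not_or.mpr ⟨h11, h12⟩),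
        if_neg (not_or.mpr ⟨h13, h14⟩)]
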